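-- pv_equiv track=rewrite | github.com/skrlor/BlueOCTest | Task1/task1.py | most_frequent_length
-- ===== SOURCE A (Python) =====
-- from collections import Counter
--
-- def most_frequent_length(lst):
--     lst_length = []
--     for i in range(len(lst)):
--         lst_length.append(len(lst[i]))
--
--     data = Counter(lst_length)
--     most_freq_length = data.most_common(1)[0][0]
--
--     lst_most_freq = []
--     for i in range(len(lst)):
--         if (len(lst[i])==most_freq_length):
--             lst_most_freq.append(lst[i])
--
--     return lst_most_freq
-- ===== SOURCE B (Python) =====
-- def most_frequent_length(lst):
--     groups = {}
--     for x in lst: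
--         groups.setdefault(len(x), []).append(x)
--     best = max(groups, key=lambda k: len(groups[k]))
--     return groups[best]
-- ===== Notes on version B (the rewrite author's own statement) =====
-- stated objective: simpler
-- what changed: Replaces the three-pass count-then-select-then-filter scheme (length list, Counter, rescan) by a single-pass grouping dict from length to its elements, selecting the largest bucket and returning it directly.
import Mathlib
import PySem

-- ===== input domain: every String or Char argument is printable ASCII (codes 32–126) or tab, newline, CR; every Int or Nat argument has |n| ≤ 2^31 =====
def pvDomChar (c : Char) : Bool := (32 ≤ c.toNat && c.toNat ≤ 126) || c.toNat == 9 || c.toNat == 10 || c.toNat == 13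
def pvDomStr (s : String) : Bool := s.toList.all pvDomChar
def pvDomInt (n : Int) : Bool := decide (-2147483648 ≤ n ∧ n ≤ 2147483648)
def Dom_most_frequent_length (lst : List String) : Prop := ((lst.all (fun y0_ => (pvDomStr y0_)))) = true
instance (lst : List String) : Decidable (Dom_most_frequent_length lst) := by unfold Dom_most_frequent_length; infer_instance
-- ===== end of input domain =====

-- B replaces A's three passes (length list, Counter, rescan) by one grouping pass
-- (length ↦ its elements) plus picking the largest bucket: simpler, same output.

-- ===== PORT A =====
def most_frequent_length (lst : List String) : List String :=
  -- lst_length = []; for i in range(len(lst)): lst_length.append(len(lst[i]))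
  let lst_length : List Nat :=
    (PySem.List.pyRange 0 (lst.length : Int) 1).foldl
      (fun acc i => acc ++ [(PySem.List.pyGetD lst i "").length]) []
  -- data = Counter(lst_length)
  let data := PySem.Dict.counter lst_length
  -- data.most_common(1)[0][0]: first item of the counter with maximal count
  -- (heapq.nlargest is stable wrt insertion order) = Python max(items, key=count),
  -- exact as PySem.List.max? (FIRST extremal element); [0] on an empty counter
  -- raises IndexError — the 'none' branch is excluded by Pre_ (lst ≠ []).
  match PySem.List.max? data.items (fun kv => kv.2) with
  | none => []
  | some kv =>
    let most_freq_length := kv.1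
    -- lst_most_freq = []; for i in range(len(lst)): if len(lst[i])==mfl: append
    (PySem.List.pyRange 0 (lst.length : Int) 1).foldl
      (fun acc i =>
        if (PySem.List.pyGetD lst i "").length = most_freq_length then
          acc ++ [PySem.List.pyGetD lst i ""] else acc) []

-- ===== PORT B =====
def most_frequent_length_alt (lst : List String) : List String :=
  -- groups = {}; for x in lst: groups.setdefault(len(x), []).append(x)
  let groups : PySem.Dict Nat (List String) :=
    lst.foldl (fun d x => d.modify x.length [] (fun b => b ++ [x])) PySem.Dict.empty
  -- best = max(groups, key=lambda k: len(groups[k])); max of an empty dict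
  -- raises ValueError — the 'none' branch is excluded by Pre_ (lst ≠ []).
  match PySem.List.max? groups.keys (fun k => (groups.getD k []).length) with
  | none => []
  | some best => groups.getD best []   -- groups[best]; best ∈ groups.keys, so getD is exact

-- ===== PRECONDITION & SPEC =====
-- Pre_ excludes only the empty list, on which A raises IndexError (most_common(1)[0])
-- and B raises ValueError (max of an empty dict).
def Pre_most_frequent_length (lst : List String) : Prop := lst ≠ []
instance (lst : List String) : Decidable (Pre_most_frequent_length lst) := by
  unfold Pre_most_frequent_length; infer_instance
def pvWitness_most_frequent_length : List String := ["a", "bb", "c"]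
def Spec_most_frequent_length (lst : List String) (out : List String) : Prop :=
  out = most_frequent_length_alt lst
instance (lst : List String) (out : List String) : Decidable (Spec_most_frequent_length lst out) := by
  unfold Spec_most_frequent_length; infer_instance

-- ===== CLAIM (what is proved, stated in full; the proofs are below) =====
def Claim_equal_most_frequent_length : Prop :=
  ∀ (lst : List String), Dom_most_frequent_length lst → Pre_most_frequent_length lst →
    Spec_most_frequent_length lst (most_frequent_length lst)

-- ===== LEMMAS AND PROOFS =====

-- B's grouping fold, looked up at any key, yields the filter of lst by that length.
theorem grp_getD (lst : List String) (d : PySem.Dict Nat (List String)) (k : Nat) :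
    (lst.foldl (fun d x => d.modify x.length [] (fun b => b ++ [x])) d).getD k []
      = d.getD k [] ++ lst.filter (fun s => s.length == k) := by
  induction lst generalizing d with
  | nil => simp
  | cons x t ih =>
    simp only [List.foldl_cons, ih, List.filter_cons]
    rw [PySem.Dict.getD_modify]
    by_cases h : k = x.length
    · simp [h, List.append_assoc]
    · have : ¬ (x.length == k) = true := by simpa using fun e => h e.symm
      simp [h, this]

-- the running-max step of PySem.List.max?, named so it can be reasoned about
def pvStep {α κ : Type} [LT κ] [DecidableLT κ] (key : α → κ) (a : Option α) (x : α) : Option α :=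
  match a with | none => some x | some m => if key m < key x then some x else some m

theorem max?_eq_foldl_pvStep {α κ : Type} [LT κ] [DecidableLT κ] (xs : List α) (key : α → κ) :
    PySem.List.max? xs key = xs.foldl (pvStep key) none := rfl

theorem foldl_pvStep_map_pair (ks : List Nat) (c : Nat → Nat) (acc : Option Nat) :
    List.foldl (pvStep (fun kv : Nat × Int => kv.2))
      (acc.map (fun k => (k, (c k : Int))))
      (ks.map (fun k => (k, (c k : Int))))
    = (List.foldl (pvStep c) acc ks).map (fun k => (k, (c k : Int))) := by
  induction ks generalizing acc with
  | nil => rfl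
  | cons k t ih =>
    cases acc with
    | none => simpa [pvStep] using ih (some k)
    | some m =>
      simp only [List.map_cons, List.foldl_cons, Option.map_some]
      by_cases h : c m < c k
      · have h' : ((c m : Int)) < (c k : Int) := by exact_mod_cast h
        simpa [pvStep, h, h'] using ih (some k)
      · have h' : ¬ ((c m : Int)) < (c k : Int) := by exact_mod_cast h
        simpa [pvStep, h, h'] using ih (some m)

-- max? over a list of (key, cast count) pairs keyed by the second component is
-- max? over the keys keyed by the count (Nat → Int cast preserves <).
theorem max?_map_pair (ks : List Nat) (c : Nat → Nat) :
    PySem.List.max? (ks.map (fun k => (k, (c k : Int)))) (fun kv => kv.2)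
    = (PySem.List.max? ks c).map (fun k => (k, (c k : Int))) := by
  rw [max?_eq_foldl_pvStep, max?_eq_foldl_pvStep]
  simpa using foldl_pvStep_map_pair ks c none

-- A's first loop builds the list of lengths.
theorem lengths_loop (lst : List String) :
    (PySem.List.pyRange 0 (lst.length : Int) 1).foldl
      (fun acc i => acc ++ [(PySem.List.pyGetD lst i "").length]) []
    = lst.map (·.length) := by
  rw [PySem.List.foldl_pyRange_zero_pyGetD' lst "" (fun acc x => acc ++ [x.length]) []]
  simpa using PySem.List.foldl_append_singleton_eq_map (·.length) lst []

-- the count of a length in the length list is the size of its bucket.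
theorem count_eq_bucket (lst : List String) (k : Nat) :
    (lst.map (·.length)).count k = (lst.filter (fun s => s.length == k)).length := by
  rw [List.count_eq_countP, List.countP_map, ← List.countP_eq_length_filter]
  apply List.countP_congr; intro a _
  simp only [Function.comp_apply, beq_iff_eq]

theorem most_frequent_length_eq (lst : List String) (h : lst ≠ []) :
    most_frequent_length lst = most_frequent_length_alt lst := by
  unfold most_frequent_length most_frequent_length_alt
  simp only [lengths_loop]
  -- identify B's keys and buckets
  have hkeys : (lst.foldl (fun d x => d.modify x.length [] (fun b => b ++ [x]))
      PySem.Dict.empty).keys = PySem.Set.ofList (lst.map (·.length)) := by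
    simpa using PySem.Dict.keys_foldl_modify_key lst (·.length) []
      (fun d x => (fun b => b ++ [x])) PySem.Dict.empty
  have hbucket : ∀ k, (lst.foldl (fun d x => d.modify x.length [] (fun b => b ++ [x]))
      PySem.Dict.empty).getD k [] = lst.filter (fun s => s.length == k) := by
    intro k; simpa using grp_getD lst PySem.Dict.empty k
  rw [PySem.Dict.items_counter, hkeys]
  simp only [hbucket]
  -- both selections are the same argmax
  have hmax := max?_map_pair (PySem.Set.ofList (lst.map (·.length)))
      (fun k => (lst.filter (fun s => s.length == k)).length)
  have hc : ∀ k : Nat, ((lst.map (·.length)).count k : Int)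
      = ((lst.filter (fun s => s.length == k)).length : Int) := by
    intro k; rw [count_eq_bucket lst k]
  have hmaps : (PySem.Set.ofList (lst.map (·.length))).map
        (fun k => (k, ((lst.map (·.length)).count k : Int)))
      = (PySem.Set.ofList (lst.map (·.length))).map
        (fun k => (k, ((lst.filter (fun s => s.length == k)).length : Int))) := by
    apply List.map_congr_left; intro k _; rw [hc]
  rw [hmaps, hmax]
  -- case on B's max?
  rcases hB : PySem.List.max? (PySem.Set.ofList (lst.map (·.length)))
      (fun k => (lst.filter (fun s => s.length == k)).length) with _ | best
  · exfalso
    rw [PySem.List.max?_eq_none_iff] at hB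
    rcases lst with _ | ⟨x, t⟩
    · exact h rfl
    · have : x.length ∈ PySem.Set.ofList ((x :: t).map (·.length)) := by
        rw [PySem.Set.mem_ofList]; simp
      rw [hB] at this; simp at this
  · rw [hB]
    simp only [Option.map_some]
    -- A's second loop is the filter
    rw [PySem.List.foldl_pyRange_zero_pyGetD' lst ""
      (fun acc x => if x.length = best then acc ++ [x] else acc) []]
    have := PySem.List.foldl_append_if (fun s => s.length == best) id lst []
    simp only [beq_iff_eq, List.map_id, List.nil_append] at this
    simpa using this

-- ===== VERDICT (by name: the statement is the Claim_ definition above) =====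
theorem most_frequent_length_spec : Claim_equal_most_frequent_length := by
  intro lst _ hpre
  unfold Spec_most_frequent_length
  exact most_frequent_length_eq lst hpre
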